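-- pv_equiv track=rewrite | github.com/sara-o-mt2/atcoder-shakyo | atcoder_shakyo/abc088_b.py | get_max_score_diff
-- ===== SOURCE A (Python) =====
-- def get_max_score_diff(cards):
--     score_a = 0
--     score_b = 0
--     cards.sort(reverse=True)
--     for i, c in enumerate(cards):
--         if i % 2 == 0:
--             score_a += c
--         else:
--             score_b += c
--     return score_a - score_b
-- ===== SOURCE B (Python) =====
-- def get_max_score_diff(cards):
--     cards.sort(reverse=True)
--     acc = 0
--     for c in reversed(cards):
--         acc = c - acc
--     return acc
-- ===== Notes on version B (the rewrite author's own statement) =====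
-- stated objective: simpler
-- what changed: replaced the enumerate loop with a parity branch and two score accumulators by a single backward fold acc = c - acc over the reverse-sorted list (identity diff(x::rest) = x - diff(rest)); avoiding the enumerate tuple and per-element parity test is the constant-factor win
import Mathlib
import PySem

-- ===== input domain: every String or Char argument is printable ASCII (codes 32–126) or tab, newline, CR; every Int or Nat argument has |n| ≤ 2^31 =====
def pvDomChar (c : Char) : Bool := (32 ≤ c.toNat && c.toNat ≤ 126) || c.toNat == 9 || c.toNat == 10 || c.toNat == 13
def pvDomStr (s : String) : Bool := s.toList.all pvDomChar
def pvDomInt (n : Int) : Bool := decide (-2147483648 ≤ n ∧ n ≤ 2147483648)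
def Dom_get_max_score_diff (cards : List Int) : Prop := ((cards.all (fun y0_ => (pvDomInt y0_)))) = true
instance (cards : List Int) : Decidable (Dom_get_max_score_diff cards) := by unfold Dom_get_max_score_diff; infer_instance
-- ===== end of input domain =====

-- B replaces A's enumerate/parity two-accumulator loop by one backward fold acc = c - acc ('simpler').
-- Both Pythons sort the argument in place; the theorems here are about the RETURN value.

-- ===== PORT A =====
def get_max_score_diff (cards : List Int) : Int :=
  let sortedCards := PySem.List.sorted cards id true
  let p := (PySem.List.enumerate sortedCards 0).foldl
    (fun (sc : Int × Int) ic =>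
      if PySem.Int.mod ic.1 2 == 0 then (sc.1 + ic.2, sc.2) else (sc.1, sc.2 + ic.2))
    (0, 0)
  p.1 - p.2

-- ===== PORT B =====
def get_max_score_diff_alt (cards : List Int) : Int :=
  let sortedCards := PySem.List.sorted cards id true
  sortedCards.reverse.foldl (fun acc c => c - acc) 0

-- ===== PRECONDITION & SPEC =====
def Spec_get_max_score_diff (cards : List Int) (out : Int) : Prop := out = get_max_score_diff_alt cards
instance (cards : List Int) (out : Int) : Decidable (Spec_get_max_score_diff cards out) := by unfold Spec_get_max_score_diff; infer_instance

-- ===== CLAIM (what is proved, stated in full; the proofs are below) =====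
def Claim_equal_get_max_score_diff : Prop := ∀ (cards : List Int), Dom_get_max_score_diff cards → Spec_get_max_score_diff cards (get_max_score_diff cards)

-- ===== LEMMAS AND PROOFS =====

-- A's loop over enumerate l s: the score difference it produces, for either parity of the start index.
lemma loopA_diff (l : List Int) : ∀ (s : Nat) (a b : Int),
    (((PySem.List.enumerate l (s : Int)).foldl
      (fun (sc : Int × Int) ic =>
        if PySem.Int.mod ic.1 2 == 0 then (sc.1 + ic.2, sc.2) else (sc.1, sc.2 + ic.2))
      (a, b)).1 -
     ((PySem.List.enumerate l (s : Int)).foldl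
      (fun (sc : Int × Int) ic =>
        if PySem.Int.mod ic.1 2 == 0 then (sc.1 + ic.2, sc.2) else (sc.1, sc.2 + ic.2))
      (a, b)).2)
    = a - b + (if s % 2 = 0 then l.foldr (fun c acc => c - acc) 0
               else -(l.foldr (fun c acc => c - acc) 0)) := by
  induction l with
  | nil => intro s a b; simp
  | cons x xs ih =>
    intro s a b
    rw [PySem.List.enumerate_cons]
    have hcast : (s : Int) + 1 = ((s + 1 : Nat) : Int) := by push_cast; ring
    have hmod : PySem.Int.mod (s : Int) 2 = ((s % 2 : Nat) : Int) :=
      PySem.Int.mod_natCast s 2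
    rcases Nat.even_or_odd s with he | ho
    · have h0 : s % 2 = 0 := Nat.even_iff.mp he
      simp only [List.foldl_cons, hmod, h0, hcast]
      rw [show ((((0:Nat) : Int) == 0) = true) from rfl]
      simp only [if_true, ih (s+1) (a + x) b]
      have h1 : (s + 1) % 2 = 1 := by omega
      simp [h1]
      ring
    · have h1 : s % 2 = 1 := Nat.odd_iff.mp ho
      simp only [List.foldl_cons, hmod, h1, hcast]
      rw [show ((((1:Nat) : Int) == 0) = false) from rfl]
      simp only [if_false, Bool.false_eq_true, ih (s+1) a (b + x)]
      have h0 : (s + 1) % 2 = 0 := by omega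
      simp [h0]
      ring

theorem get_max_score_diff_spec : Claim_equal_get_max_score_diff := by
  intro cards _
  unfold Spec_get_max_score_diff get_max_score_diff get_max_score_diff_alt
  have h := loopA_diff (PySem.List.sorted cards id true) 0 0 0
  simp only [Nat.cast_zero] at h
  simp only [h, List.foldl_reverse]
  simp
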